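-- pv_equiv track=rewrite | github.com/josephkamau32/Telivus-AI | backend/tests/test_helpers.py | categorize_symptoms
-- ===== SOURCE A (Python) =====
-- from typing import Dict, Any
--
-- def categorize_symptoms(symptoms: list) -> Dict[str, Any]:
--     """
--     Categorize symptoms as common, serious, or emergency.
--
--     Args:
--         symptoms: List of symptom strings
--
--     Returns:
--         Dictionary with category and details
--     """
--     if not symptoms:
--         return {"category": "none", "risk_level": "low"}
--
--     # Emergency symptoms (require immediate medical attention)
--     emergency_keywords = [
--         "chest pain", "difficulty breathing", "severe bleeding",
--         "severe headache", "confusion", "unconscious", "seizure",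
--         "severe burn", "paralysis", "stroke symptoms"
--     ]
--
--     # Serious symptoms (require medical attention soon)
--     serious_keywords = [
--         "high fever", "severe pain", "persistent vomiting",
--         "blood in stool", "blood in urine", "severe diarrhea",
--         "rapid heartbeat", "difficulty swallowing"
--     ]
--
--     # Check for emergency symptoms
--     symptoms_lower = [s.lower() for s in symptoms]
--     for emergency in emergency_keywords:
--         if any(emergency in symptom for symptom in symptoms_lower):
--             return {
--                 "category": "emergency",
--                 "risk_level": "critical",
--                 "action": "Seek immediate medical attention"
--             }
--
--     # Check for serious symptoms
--     for serious in serious_keywords: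
--         if any(serious in symptom for symptom in symptoms_lower):
--             return {
--                 "category": "serious",
--                 "risk_level": "high",
--                 "action": "Consult a doctor within 24 hours"
--             }
--
--     # Common symptoms
--     return {
--         "category": "common",
--         "risk_level": "low",
--         "action": "Monitor symptoms and self-care"
--     }
-- ===== SOURCE B (Python) =====
-- def categorize_symptoms(symptoms: list):
--     """One pass over the symptoms computing a running max severity (0/1/2),
--     then map the max level to the result dict."""
--     if not symptoms:
--         return {"category": "none", "risk_level": "low"}
--
--     emergency_keywords = [
--         "chest pain", "difficulty breathing", "severe bleeding",
--         "severe headache", "confusion", "unconscious", "seizure",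
--         "severe burn", "paralysis", "stroke symptoms"
--     ]
--     serious_keywords = [
--         "high fever", "severe pain", "persistent vomiting",
--         "blood in stool", "blood in urine", "severe diarrhea",
--         "rapid heartbeat", "difficulty swallowing"
--     ]
--
--     best = 0
--     for s in symptoms:
--         sl = s.lower()
--         if any(k in sl for k in emergency_keywords):
--             best = max(best, 2)
--         elif any(k in sl for k in serious_keywords):
--             best = max(best, 1)
--
--     if best == 2:
--         return {
--             "category": "emergency",
--             "risk_level": "critical",
--             "action": "Seek immediate medical attention"
--         }
--     if best == 1:
--         return {
--             "category": "serious",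
--             "risk_level": "high",
--             "action": "Consult a doctor within 24 hours"
--         }
--     return {
--         "category": "common",
--         "risk_level": "low",
--         "action": "Monitor symptoms and self-care"
--     }
-- ===== Notes on version B (the rewrite author's own statement) =====
-- stated objective: alternative
-- what changed: Replaced A's two sequential keyword-major phases (each scanning all symptoms per keyword, returning early) with a single symptom-major pass that keeps a running maximum severity level (0=common, 1=serious, 2=emergency) and maps the final maximum to the result dict.
import Mathlib
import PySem

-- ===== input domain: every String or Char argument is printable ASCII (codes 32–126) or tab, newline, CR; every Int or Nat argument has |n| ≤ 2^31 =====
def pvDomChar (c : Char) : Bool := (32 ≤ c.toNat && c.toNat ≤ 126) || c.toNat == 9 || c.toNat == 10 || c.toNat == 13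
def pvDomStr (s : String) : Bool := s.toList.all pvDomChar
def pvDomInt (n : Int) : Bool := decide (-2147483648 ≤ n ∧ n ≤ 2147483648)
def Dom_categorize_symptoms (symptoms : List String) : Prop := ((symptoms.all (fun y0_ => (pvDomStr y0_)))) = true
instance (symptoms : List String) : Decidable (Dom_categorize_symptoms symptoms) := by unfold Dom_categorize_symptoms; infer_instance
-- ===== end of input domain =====

-- B replaces A's two keyword-major early-return phases by one symptom-major pass keeping a running max severity; same cost, different decomposition.

-- ===== PORT A =====
def pvEmergencyKeywords : List String :=
  ["chest pain", "difficulty breathing", "severe bleeding",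
   "severe headache", "confusion", "unconscious", "seizure",
   "severe burn", "paralysis", "stroke symptoms"]

def pvSeriousKeywords : List String :=
  ["high fever", "severe pain", "persistent vomiting",
   "blood in stool", "blood in urine", "severe diarrhea",
   "rapid heartbeat", "difficulty swallowing"]

def pvNoneDict : List (String × String) := [("category", "none"), ("risk_level", "low")]
def pvEmergencyDict : List (String × String) :=
  [("category", "emergency"), ("risk_level", "critical"), ("action", "Seek immediate medical attention")]
def pvSeriousDict : List (String × String) :=
  [("category", "serious"), ("risk_level", "high"), ("action", "Consult a doctor within 24 hours")]
def pvCommonDict : List (String × String) :=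
  [("category", "common"), ("risk_level", "low"), ("action", "Monitor symptoms and self-care")]

-- A's 'for emergency in emergency_keywords: if any(...): return dict' loop (and the serious one)
def pvKeywordLoop (kws : List String) (symptomsLower : List String) (hit : List (String × String)) :
    Option (List (String × String)) :=
  match kws with
  | [] => none
  | k :: tl =>
      if symptomsLower.any (fun s => PySem.Str.isIn k s) then some hit
      else pvKeywordLoop tl symptomsLower hit

def categorize_symptoms (symptoms : List String) : List (String × String) :=
  if symptoms = [] then pvNoneDict
  else
    let symptoms_lower := symptoms.map PySem.Str.lower
    match pvKeywordLoop pvEmergencyKeywords symptoms_lower pvEmergencyDict with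
    | some r => r
    | none =>
        match pvKeywordLoop pvSeriousKeywords symptoms_lower pvSeriousDict with
        | some r => r
        | none => pvCommonDict

-- ===== PORT B =====
-- severity of one symptom: 2 emergency / 1 serious / 0 common
def pvSeverity (s : String) : Nat :=
  if pvEmergencyKeywords.any (fun k => PySem.Str.isIn k (PySem.Str.lower s)) then 2
  else if pvSeriousKeywords.any (fun k => PySem.Str.isIn k (PySem.Str.lower s)) then 1
  else 0

def categorize_symptoms_alt (symptoms : List String) : List (String × String) :=
  if symptoms = [] then pvNoneDict
  else
    let best := symptoms.foldl (fun b s => max b (pvSeverity s)) 0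
    if best = 2 then pvEmergencyDict
    else if best = 1 then pvSeriousDict
    else pvCommonDict

-- ===== PRECONDITION & SPEC =====
def Spec_categorize_symptoms (symptoms : List String) (out : List (String × String)) : Prop := out = categorize_symptoms_alt symptoms
instance (symptoms : List String) (out : List (String × String)) : Decidable (Spec_categorize_symptoms symptoms out) := by unfold Spec_categorize_symptoms; infer_instance

-- ===== CLAIM (what is proved, stated in full; the proofs are below) =====
def Claim_equal_categorize_symptoms : Prop := ∀ (symptoms : List String), Dom_categorize_symptoms symptoms → Spec_categorize_symptoms symptoms (categorize_symptoms symptoms)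

-- ===== LEMMAS AND PROOFS =====

-- A's keyword loop is the existence test over keywords
lemma pvKeywordLoop_eq (kws sl : List String) (hit : List (String × String)) :
    pvKeywordLoop kws sl hit =
      (if kws.any (fun k => sl.any (fun s => PySem.Str.isIn k s)) then some hit else none) := by
  induction kws with
  | nil => simp [pvKeywordLoop]
  | cons k tl ih =>
      by_cases h : (sl.any fun s => PySem.Str.isIn k s) = true
      · simp only [pvKeywordLoop, h, if_pos, List.any_cons, Bool.true_or]
      · have h' : (sl.any fun s => PySem.Str.isIn k s) = false := by
          simpa using h
        simp only [pvKeywordLoop, h', if_false, List.any_cons, Bool.false_or, ih, Bool.false_eq_true]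

-- swap the two 'any's
lemma any_swap (kws sl : List String) :
    (kws.any (fun k => sl.any (fun s => PySem.Str.isIn k s))) =
      (sl.any (fun s => kws.any (fun k => PySem.Str.isIn k s))) := by
  rw [Bool.eq_iff_iff]
  simp only [List.any_eq_true]
  constructor <;> rintro ⟨x, hx, y, hy, h⟩ <;> exact ⟨y, hy, x, hx, h⟩

lemma sev2_eq (s : String) :
    decide (pvSeverity s = 2) =
      pvEmergencyKeywords.any (fun k => PySem.Str.isIn k (PySem.Str.lower s)) := by
  unfold pvSeverity; split_ifs <;> simp_all

lemma sev1_eq (s : String) :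
    decide (pvSeverity s = 1) =
      (!(pvEmergencyKeywords.any (fun k => PySem.Str.isIn k (PySem.Str.lower s))) &&
        pvSeriousKeywords.any (fun k => PySem.Str.isIn k (PySem.Str.lower s))) := by
  unfold pvSeverity; split_ifs <;> simp_all

-- B's fold computes the three-way classification of the list
lemma fold_max_char (xs : List String) (b : Nat) (hb : b ≤ 2) :
    xs.foldl (fun a s => max a (pvSeverity s)) b =
      (if xs.any (fun s => decide (pvSeverity s = 2)) then 2
       else if xs.any (fun s => decide (pvSeverity s = 1)) then max b 1
       else b) := by
  induction xs generalizing b with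
  | nil => simp
  | cons s tl ih =>
      have hsev : pvSeverity s = 2 ∨ pvSeverity s = 1 ∨ pvSeverity s = 0 := by
        unfold pvSeverity; split_ifs <;> simp
      simp only [List.foldl_cons, List.any_cons]
      rw [ih (max b (pvSeverity s)) (by rcases hsev with h|h|h <;> omega)]
      rcases hsev with h | h | h <;>
        simp only [h, Bool.true_or, Bool.false_or, decide_true,
          Nat.reduceEqDiff, decide_false] <;>
        split_ifs <;> omega

-- ===== VERDICT (by name: the statement is the Claim_ definition above) =====
theorem categorize_symptoms_spec : Claim_equal_categorize_symptoms := by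
  intro symptoms _
  show categorize_symptoms symptoms = categorize_symptoms_alt symptoms
  unfold categorize_symptoms categorize_symptoms_alt
  by_cases hnil : symptoms = []
  · simp [hnil]
  · simp only [if_neg hnil]
    rw [pvKeywordLoop_eq, pvKeywordLoop_eq, any_swap, any_swap,
        List.any_map, List.any_map, fold_max_char symptoms 0 (by omega)]
    simp only [Function.comp_def, sev2_eq]
    by_cases hE : (symptoms.any fun s =>
        pvEmergencyKeywords.any fun k => PySem.Str.isIn k (PySem.Str.lower s)) = true
    · simp only [hE, if_true]
    · have hEf : (symptoms.any fun s =>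
          pvEmergencyKeywords.any fun k => PySem.Str.isIn k (PySem.Str.lower s)) = false := by
        simpa using hE
      have hpt : ∀ s ∈ symptoms,
          (pvEmergencyKeywords.any fun k => PySem.Str.isIn k (PySem.Str.lower s)) = false := by
        simpa [List.any_eq_false] using hEf
      have h1 : (symptoms.any fun s => decide (pvSeverity s = 1)) =
          (symptoms.any fun s => pvSeriousKeywords.any fun k =>
            PySem.Str.isIn k (PySem.Str.lower s)) := by
        rw [Bool.eq_iff_iff]
        simp only [List.any_eq_true]
        constructor
        · rintro ⟨s, hs, h⟩
          rw [sev1_eq] at h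
          rw [Bool.and_eq_true] at h
          exact ⟨s, hs, by simpa [List.any_eq_true] using h.2⟩
        · rintro ⟨s, hs, h⟩
          refine ⟨s, hs, ?_⟩
          rw [sev1_eq, hpt s hs]
          simpa [List.any_eq_true] using h
      simp only [hEf, if_false, Bool.false_eq_true, h1]
      split_ifs <;> first | rfl | omega | simp_all
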